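-- pv_equiv track=rewrite | github.com/GoodManQiu123/2025-AP-Fintech | core/portfolio.py | _consecutive_counts
-- ===== SOURCE A (Python) =====
-- from typing import List, Optional, Tuple
--
-- def _consecutive_counts(vals: List[bool]) -> Tuple[int, int]:
--     """Return (max_consecutive_true, max_consecutive_false)."""
--     max_t = max_f = cur_t = cur_f = 0
--     for v in vals:
--         if v:
--             cur_t += 1
--             cur_f = 0
--         else:
--             cur_f += 1
--             cur_t = 0
--         max_t = max(max_t, cur_t)
--         max_f = max(max_f, cur_f)
--     return max_t, max_f
-- ===== SOURCE B (Python) =====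
-- from itertools import groupby
-- from typing import List, Tuple
--
-- def _consecutive_counts(vals: List[bool]) -> Tuple[int, int]:
--     """Return (max_consecutive_true, max_consecutive_false)."""
--     runs = [(k, sum(1 for _ in g)) for k, g in groupby(vals)]
--     max_t = max((n for k, n in runs if k), default=0)
--     max_f = max((n for k, n in runs if not k), default=0)
--     return max_t, max_f
-- ===== Notes on version B (the rewrite author's own statement) =====
-- stated objective: idiomatic
-- what changed: B first collapses the list into (value, run-length) pairs with itertools.groupby and then takes the max run length per key, instead of threading four running counters (cur/max for true and false) through one loop.
import Mathlib
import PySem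

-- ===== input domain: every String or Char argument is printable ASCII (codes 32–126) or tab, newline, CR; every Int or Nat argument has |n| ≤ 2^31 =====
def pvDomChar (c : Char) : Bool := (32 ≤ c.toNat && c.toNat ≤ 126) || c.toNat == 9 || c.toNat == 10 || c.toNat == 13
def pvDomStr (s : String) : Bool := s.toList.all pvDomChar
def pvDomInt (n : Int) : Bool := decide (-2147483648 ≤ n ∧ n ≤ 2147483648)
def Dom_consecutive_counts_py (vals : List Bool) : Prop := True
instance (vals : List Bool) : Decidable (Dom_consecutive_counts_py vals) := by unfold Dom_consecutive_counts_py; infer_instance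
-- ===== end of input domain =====

-- B replaces A's four running counters with itertools.groupby run-lengths plus a max per key (idiomatic, same O(n) cost).

-- ===== PORT A =====
-- the for-loop of A, state (max_t, max_f, cur_t, cur_f); each step updates the
-- current counters then takes both maxes, exactly as the Python body does
def pvLoopA (mt mf ct cf : Int) : List Bool → Int × Int
  | [] => (mt, mf)
  | v :: rest =>
      if v then pvLoopA (max mt (ct + 1)) (max mf 0) (ct + 1) 0 rest
      else pvLoopA (max mt 0) (max mf (cf + 1)) 0 (cf + 1) rest

def consecutive_counts_py (vals : List Bool) : Int × Int :=
  pvLoopA 0 0 0 0 vals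

-- ===== PORT B =====
-- itertools.groupby(vals) with run lengths: current key k, current length n
def pvRunsGo (k : Bool) (n : Int) : List Bool → List (Bool × Int)
  | [] => [(k, n)]
  | v :: rest => if v == k then pvRunsGo k (n + 1) rest else (k, n) :: pvRunsGo v 1 rest

def pvRuns : List Bool → List (Bool × Int)
  | [] => []
  | v :: rest => pvRunsGo v 1 rest

-- max((n for k, n in runs if k == want), default=acc) as a fold (acc = 0 at the call)
def pvMaxSel (want : Bool) (acc : Int) : List (Bool × Int) → Int
  | [] => acc
  | r :: rs => pvMaxSel want (if r.1 == want then max acc r.2 else acc) rs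

def consecutive_counts_py_alt (vals : List Bool) : Int × Int :=
  (pvMaxSel true 0 (pvRuns vals), pvMaxSel false 0 (pvRuns vals))

-- ===== PRECONDITION & SPEC =====
def Spec_consecutive_counts_py (vals : List Bool) (out : Int × Int) : Prop := out = consecutive_counts_py_alt vals
instance (vals : List Bool) (out : Int × Int) : Decidable (Spec_consecutive_counts_py vals out) := by unfold Spec_consecutive_counts_py; infer_instance

-- ===== CLAIM (what is proved, stated in full; the proofs are below) =====
def Claim_equal_consecutive_counts_py : Prop := ∀ (vals : List Bool), Dom_consecutive_counts_py vals → Spec_consecutive_counts_py vals (consecutive_counts_py vals)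

-- ===== LEMMAS AND PROOFS =====

lemma pvRunsGo_cons_eq (k : Bool) (n : Int) (rest : List Bool) :
    pvRunsGo k n (k :: rest) = pvRunsGo k (n + 1) rest := by
  cases k <;> simp [pvRunsGo]

lemma pvRunsGo_cons_ne (k : Bool) (n : Int) (rest : List Bool) :
    pvRunsGo k n ((!k) :: rest) = (k, n) :: pvRunsGo (!k) 1 rest := by
  cases k <;> simp [pvRunsGo]

lemma pvMaxSel_cons_same (want : Bool) (acc n : Int) (rs : List (Bool × Int)) :
    pvMaxSel want acc ((want, n) :: rs) = pvMaxSel want (max acc n) rs := by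
  simp [pvMaxSel]

lemma pvMaxSel_cons_other (want : Bool) (acc n : Int) (rs : List (Bool × Int)) :
    pvMaxSel want acc ((!want, n) :: rs) = pvMaxSel want acc rs := by
  cases want <;> simp [pvMaxSel]

-- the first run emitted by pvRunsGo k n has length ≥ n, so a max with x ≤ n in the
-- accumulator is absorbed
lemma pvMaxSel_absorb : ∀ (rest : List Bool) (k : Bool) (n acc x : Int), x ≤ n →
    pvMaxSel k (max acc x) (pvRunsGo k n rest) = pvMaxSel k acc (pvRunsGo k n rest) := by
  intro rest
  induction rest with
  | nil =>
      intro k n acc x hx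
      simp only [pvRunsGo]
      rw [pvMaxSel_cons_same, pvMaxSel_cons_same]
      have : max (max acc x) n = max acc n := by omega
      rw [this]
  | cons v t ih =>
      intro k n acc x hx
      by_cases hv : v = k
      · subst hv
        rw [pvRunsGo_cons_eq]
        exact ih v (n + 1) acc x (by omega)
      · have hv' : v = !k := by cases k <;> cases v <;> simp_all
        subst hv'
        rw [pvRunsGo_cons_ne, pvMaxSel_cons_same, pvMaxSel_cons_same]
        have : max (max acc x) n = max acc n := by omega
        rw [this]

-- main invariant: mid-run of key k with current length n (the other counter 0),
-- accumulators mt, mf already dominating their own current counter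
lemma pvLoop_runs : ∀ (vals : List Bool) (k : Bool) (n mt mf : Int),
    1 ≤ n →
    (if k then n ≤ mt ∧ 0 ≤ mf else n ≤ mf ∧ 0 ≤ mt) →
    pvLoopA mt mf (if k then n else 0) (if k then 0 else n) vals
      = (pvMaxSel true mt (pvRunsGo k n vals), pvMaxSel false mf (pvRunsGo k n vals)) := by
  intro vals
  induction vals with
  | nil =>
      intro k n mt mf hn hinv
      cases k with
      | true =>
          simp only [reduceIte] at hinv ⊢
          simp only [pvRunsGo, pvLoopA]
          rw [pvMaxSel_cons_same, show ((true, n) : Bool × Int) = (!false, n) from rfl,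
              pvMaxSel_cons_other]
          simp only [pvMaxSel]
          have : max mt n = mt := by omega
          rw [this]
      | false =>
          simp only [Bool.false_eq_true, if_false] at hinv ⊢
          simp only [pvRunsGo, pvLoopA]
          rw [pvMaxSel_cons_same, show ((false, n) : Bool × Int) = (!true, n) from rfl,
              pvMaxSel_cons_other]
          simp only [pvMaxSel]
          have : max mf n = mf := by omega
          rw [this]
  | cons v rest ih =>
      intro k n mt mf hn hinv
      cases k with
      | true =>
          simp only [reduceIte] at hinv ⊢
          obtain ⟨h1, h2⟩ := hinv
          cases v with
          | true =>
              rw [pvRunsGo_cons_eq]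
              simp only [pvLoopA, ite_true]
              have hmf : max mf 0 = mf := by omega
              rw [hmf]
              have := ih true (n + 1) (max mt (n + 1)) mf (by omega) (by simp; omega)
              simp only [ite_true] at this
              rw [this, pvMaxSel_absorb rest true (n + 1) mt (n + 1) le_rfl]
          | false =>
              rw [show (false : Bool) = !true from rfl, pvRunsGo_cons_ne]
              simp only [pvLoopA, Bool.not_true, Bool.false_eq_true, if_false, zero_add]
              have hmt : max mt 0 = mt := by omega
              rw [hmt]
              have := ih false 1 mt (max mf 1) le_rfl (by simp; omega)
              simp only [ite_false, Bool.false_eq_true, if_false] at this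
              rw [this, show ((true, n) : Bool × Int) = (!false, n) from rfl,
                  pvMaxSel_cons_other, show ((!false : Bool)) = true from rfl,
                  pvMaxSel_cons_same]
              have hmtn : max mt n = mt := by omega
              rw [hmtn, pvMaxSel_absorb rest false 1 mf 1 le_rfl]
      | false =>
          simp only [Bool.false_eq_true, if_false] at hinv ⊢
          obtain ⟨h1, h2⟩ := hinv
          cases v with
          | false =>
              rw [pvRunsGo_cons_eq]
              simp only [pvLoopA, Bool.false_eq_true, if_false]
              have hmt : max mt 0 = mt := by omega
              rw [hmt]
              have := ih false (n + 1) mt (max mf (n + 1)) (by omega) (by simp; omega)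
              simp only [ite_false, Bool.false_eq_true, if_false] at this
              rw [this, pvMaxSel_absorb rest false (n + 1) mf (n + 1) le_rfl]
          | true =>
              rw [show (true : Bool) = !false from rfl, pvRunsGo_cons_ne]
              simp only [pvLoopA, Bool.not_false, ite_true, zero_add]
              have hmf : max mf 0 = mf := by omega
              rw [hmf]
              have := ih true 1 (max mt 1) mf le_rfl (by simp; omega)
              simp only [ite_true] at this
              rw [this, show ((false, n) : Bool × Int) = (!true, n) from rfl,
                  pvMaxSel_cons_other, show ((!true : Bool)) = false from rfl,
                  pvMaxSel_cons_same]
              have hmfn : max mf n = mf := by omega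
              rw [hmfn, pvMaxSel_absorb rest true 1 mt 1 le_rfl]

-- ===== VERDICT (by name: the statement is the Claim_ definition above) =====
theorem consecutive_counts_py_spec : Claim_equal_consecutive_counts_py := by
  intro vals _
  show consecutive_counts_py vals = consecutive_counts_py_alt vals
  cases vals with
  | nil => rfl
  | cons v rest =>
      cases v with
      | true =>
          show pvLoopA 0 0 0 0 (true :: rest) = _
          simp only [pvLoopA, ite_true, zero_add]
          have := pvLoop_runs rest true 1 (max 0 1) (max 0 0) le_rfl (by simp)
          simp only [ite_true] at this
          rw [this]
          show _ = (pvMaxSel true 0 (pvRunsGo true 1 rest), pvMaxSel false 0 (pvRunsGo true 1 rest))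
          rw [pvMaxSel_absorb rest true 1 0 1 le_rfl]
          norm_num
      | false =>
          show pvLoopA 0 0 0 0 (false :: rest) = _
          simp only [pvLoopA, Bool.false_eq_true, if_false, zero_add]
          have := pvLoop_runs rest false 1 (max 0 0) (max 0 1) le_rfl (by simp)
          simp only [ite_false, Bool.false_eq_true, if_false] at this
          rw [this]
          show _ = (pvMaxSel true 0 (pvRunsGo false 1 rest), pvMaxSel false 0 (pvRunsGo false 1 rest))
          rw [pvMaxSel_absorb rest false 1 0 1 le_rfl]
          norm_num
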